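-- pv_equiv track=rewrite | github.com/kairanskrr/PoCShift | pocshift/poc_abstraction/address_recovery/address_mapping.py | parse_read_function_checker_result
-- ===== SOURCE A (Python) =====
-- def parse_read_function_checker_result(log):
--     if 'Logs' not in log:
--         return
--     project_output = {}
--     read_function_list = log.split('Logs:')[-1].split('Suite result:')[0].strip().split('\n')
--     for function in read_function_list:
--         if ':' in function:
--             split_temp = function.split(':')
--             read_function = split_temp[0].strip()
--             address = split_temp[1].strip()
--             if address not in project_output:
--                 project_output[address] = read_function
--             else:
--                 if len(project_output[address]) > len(read_function):
--                     project_output[address] = read_function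
--     return project_output
-- ===== SOURCE B (Python) =====
-- def _lines(log):
--     section = log.split('Logs:')[-1].split('Suite result:')[0]
--     return section.strip().split('\n')
--
--
-- def _pairs(lines):
--     out = []
--     for line in lines:
--         if ':' in line:
--             parts = line.split(':')
--             out.append((parts[1].strip(), parts[0].strip()))
--     return out
--
--
-- def parse_read_function_checker_result(log):
--     if 'Logs' not in log:
--         return None
--     groups = {}
--     for address, name in _pairs(_lines(log)):
--         groups.setdefault(address, []).append(name)
--     return {address: min(names, key=len) for address, names in groups.items()}
-- ===== Notes on version B (the rewrite author's own statement) =====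
-- stated objective: alternative
-- what changed: A is one pass that keeps a running shortest name per address while parsing; B is three staged passes: extract the (address, name) pairs, group them into a dict of lists, then take each group's first shortest name with min(names, key=len).
import Mathlib
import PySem

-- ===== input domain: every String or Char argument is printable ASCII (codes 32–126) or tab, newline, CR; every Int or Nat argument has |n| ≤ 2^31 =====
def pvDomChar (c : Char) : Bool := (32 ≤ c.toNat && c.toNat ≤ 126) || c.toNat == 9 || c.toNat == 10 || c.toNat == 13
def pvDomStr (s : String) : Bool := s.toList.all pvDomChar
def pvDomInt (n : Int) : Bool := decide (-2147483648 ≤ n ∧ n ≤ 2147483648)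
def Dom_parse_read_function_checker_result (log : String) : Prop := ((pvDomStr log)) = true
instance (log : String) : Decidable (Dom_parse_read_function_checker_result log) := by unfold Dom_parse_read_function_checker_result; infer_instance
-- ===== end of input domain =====

-- B replaces A's single pass with a running shortest-name-per-address dict by three staged
-- passes: extract (address, name) pairs, group them into lists, then take each group's
-- first shortest name (objective: alternative).

-- ===== PORT A =====
-- A-side helper: the body of A's for-loop (one line processed, running dict updated)
def pvStepA (d : PySem.Dict String String) (function : String) : PySem.Dict String String :=
  if PySem.Str.isIn ":" function then
    let split_temp := (PySem.Str.split? function ":").getD []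
    let read_function := PySem.Str.strip (split_temp.headD "")
    let address := PySem.Str.strip (split_temp.getD 1 "")
    if d.contains address = false then d.insert address read_function
    else if PySem.Str.len (d.getD address "") > PySem.Str.len read_function then
      d.insert address read_function
    else d
  else d

-- split? with a nonempty literal separator is always `some` of a nonempty list; the
-- `.getD` defaults on it are unreachable and only make the expression total.
def parse_read_function_checker_result (log : String) : Option (List (String × String)) :=
  if PySem.Str.isIn "Logs" log = false then none else
  let read_function_list :=
    (PySem.Str.split?
      (PySem.Str.strip
        ((((PySem.Str.split? log "Logs:").getD []).getLast?.getD ""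
          |> fun s => (PySem.Str.split? s "Suite result:").getD []).headD ""))
      "\n").getD []
  let project_output := read_function_list.foldl pvStepA PySem.Dict.empty
  some project_output.items

-- ===== PORT B =====
-- B-side helper: Source B's _lines (the `[-1]` is ported as reverse-then-first)
def pvLinesB (log : String) : List String :=
  let tail := ((PySem.Str.split? log "Logs:").getD []).reverse.headD ""
  let sect := ((PySem.Str.split? tail "Suite result:").getD []).headD ""
  (PySem.Str.split? (PySem.Str.strip sect) "\n").getD []

-- B-side helper: the body of _pairs' loop (one line, pair appended or skipped)
def pvPairOfLine (line : String) : Option (String × String) :=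
  if PySem.Str.isIn ":" line then
    let parts := (PySem.Str.split? line ":").getD []
    some (PySem.Str.strip ((parts.drop 1).headD ""), PySem.Str.strip (parts.headD ""))
  else none

-- B-side helper: Source B's _pairs (append-or-skip loop = filterMap)
def pvPairsB (lines : List String) : List (String × String) :=
  lines.filterMap pvPairOfLine

def parse_read_function_checker_result_alt (log : String) : Option (List (String × String)) :=
  if PySem.Str.isIn "Logs" log = false then none else
  let groups :=
    (pvPairsB (pvLinesB log)).foldl
      (fun g q => g.modify q.1 [] (· ++ [q.2])) PySem.Dict.empty
  -- min(names, key=len): each group is nonempty, so the `.getD ""` is unreachable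
  some (groups.items.map (fun q => (q.1, (PySem.List.min? q.2 PySem.Str.len).getD "")))

-- ===== PRECONDITION & SPEC =====
def Spec_parse_read_function_checker_result (log : String) (out : Option (List (String × String))) : Prop := out = parse_read_function_checker_result_alt log
instance (log : String) (out : Option (List (String × String))) : Decidable (Spec_parse_read_function_checker_result log out) := by unfold Spec_parse_read_function_checker_result; infer_instance

-- ===== CLAIM (what is proved, stated in full; the proofs are below) =====
def Claim_equal_parse_read_function_checker_result : Prop := ∀ (log : String), Dom_parse_read_function_checker_result log → Spec_parse_read_function_checker_result log (parse_read_function_checker_result log)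

-- ===== LEMMAS AND PROOFS =====

-- first shortest name of a group
def pvMins (ns : List String) : String := (PySem.List.min? ns PySem.Str.len).getD ""

-- B's reducing pass, as a Dict-to-Dict abstraction
def pvMapMin (g : PySem.Dict String (List String)) : PySem.Dict String String :=
  PySem.Dict.mk (g.items.map (fun p => (p.1, pvMins p.2)))

theorem pvMapMin_items (g : PySem.Dict String (List String)) :
    (pvMapMin g).items
      = g.items.map (fun p => (p.1, (PySem.List.min? p.2 PySem.Str.len).getD "")) := rfl

theorem pvMapMin_contains (g : PySem.Dict String (List String)) (a : String) :
    (pvMapMin g).contains a = g.contains a := by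
  simp [pvMapMin, PySem.Dict.contains, List.any_map, Function.comp_def]

theorem pvMapMin_get? (g : PySem.Dict String (List String)) (a : String) :
    (pvMapMin g).get? a = (g.get? a).map pvMins := by
  obtain ⟨l⟩ := g
  induction l with
  | nil => rfl
  | cons p t ih =>
    obtain ⟨k, v⟩ := p
    by_cases h : (k == a) = true
    · simp [pvMapMin, PySem.Dict.get?_mk_cons, h]
    · have := ih
      simp only [pvMapMin, List.map_cons, PySem.Dict.get?_mk_cons, h] at *
      exact this

theorem pvMapMin_keys (g : PySem.Dict String (List String)) :
    (pvMapMin g).keys = g.keys := by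
  simp [pvMapMin, PySem.Dict.keys, List.map_map, Function.comp]

theorem pvMapMin_insert (g : PySem.Dict String (List String)) (a : String) (v : List String) :
    pvMapMin (g.insert a v) = (pvMapMin g).insert a (pvMins v) := by
  by_cases h : g.contains a = true
  · have h' : (pvMapMin g).contains a = true := by rw [pvMapMin_contains]; exact h
    apply PySem.Dict.ext
    rw [pvMapMin, PySem.Dict.items_insert_of_contains _ _ h,
        PySem.Dict.items_insert_of_contains _ _ h', pvMapMin, List.map_map, List.map_map]
    apply List.map_congr_left
    intro p _
    by_cases hk : (p.1 == a) = true <;> simp [Function.comp, hk]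
  · have h' : (pvMapMin g).contains a = false := by
      rw [pvMapMin_contains]; exact Bool.eq_false_iff.mpr h
    apply PySem.Dict.ext
    rw [pvMapMin, PySem.Dict.items_insert_of_not_contains _ _ (Bool.eq_false_iff.mpr h),
        PySem.Dict.items_insert_of_not_contains _ _ h', pvMapMin, List.map_append]
    rfl

-- inserting a key's current value back changes nothing (unique keys)
theorem pv_insert_getD_self (d : PySem.Dict String String) (a v : String)
    (hnd : d.keys.Nodup) (hv : d.get? a = some v) : d.insert a v = d := by
  have hmem : (a, v) ∈ d.items := PySem.Dict.mem_items_of_get?_eq_some d hv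
  have hc : d.contains a = true := by
    rw [PySem.Dict.contains_eq_isSome_get?, hv]; rfl
  apply PySem.Dict.ext
  rw [PySem.Dict.items_insert_of_contains _ _ hc]
  have hinj := List.inj_on_of_nodup_map (f := Prod.fst) (l := d.items) hnd
  conv_rhs => rw [← List.map_id d.items]
  apply List.map_congr_left
  intro p hp
  by_cases h : (p.1 == a) = true
  · have hp1 : p = (a, v) := hinj hp hmem (by simpa using h)
    simp [hp1]
  · simp [h]

theorem pvMins_append (ns : List String) (n : String) (h : ns ≠ []) :
    pvMins (ns ++ [n]) =
      if PySem.Str.len n < PySem.Str.len (pvMins ns) then n else pvMins ns := by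
  obtain ⟨m, hm⟩ : ∃ m, PySem.List.min? ns PySem.Str.len = some m := by
    cases hmin : PySem.List.min? ns PySem.Str.len with
    | none => exact absurd ((PySem.List.min?_eq_none_iff ns PySem.Str.len).mp hmin) h
    | some m => exact ⟨m, rfl⟩
  have h1 : PySem.List.min? (ns ++ [n]) PySem.Str.len
      = if PySem.Str.len n < PySem.Str.len m then some n else some m := by
    unfold PySem.List.min? at hm ⊢
    rw [List.foldl_append, hm]
    simp [List.foldl]
  unfold pvMins
  rw [h1, hm]
  simp only [apply_ite (fun o : Option String => o.getD ""), Option.getD_some]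

-- A's [1] (as `.getD 1`) is B's drop-then-first
theorem pv_getD_one (l : List String) (d : String) : l.getD 1 d = (l.drop 1).headD d := by
  cases l with
  | nil => rfl
  | cons h t => cases t <;> simp [List.getD]

-- A's `[-1]` (as getLast?) is B's reverse-then-first
theorem pv_last_eq_rev_head (l : List String) (d : String) :
    l.getLast?.getD d = l.reverse.headD d := by
  simp [List.headD_eq_head?_getD, List.head?_reverse]

-- the central invariant: A's running loop over the lines equals B's group-then-reduce
theorem pv_loop (ls : List String) (g : PySem.Dict String (List String))
    (hnd : g.keys.Nodup) (hne : ∀ p ∈ g.items, p.2 ≠ []) :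
    ls.foldl pvStepA (pvMapMin g)
      = pvMapMin ((pvPairsB ls).foldl (fun g q => g.modify q.1 [] (· ++ [q.2])) g) := by
  induction ls generalizing g with
  | nil => rfl
  | cons l t ih =>
    simp only [List.foldl_cons]
    by_cases hcol : PySem.Str.isIn ":" l = true
    · set parts := (PySem.Str.split? l ":").getD [] with hparts
      set n := PySem.Str.strip (parts.headD "") with hn
      set a := PySem.Str.strip (parts.getD 1 "") with ha
      have hpair : pvPairOfLine l = some (a, n) := by
        rw [pvPairOfLine, if_pos hcol, ha, pv_getD_one]
      have hfm : pvPairsB (l :: t) = (a, n) :: pvPairsB t := by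
        rw [pvPairsB, List.filterMap_cons, hpair]; rfl
      have hA : pvStepA (pvMapMin g) l =
          (if (pvMapMin g).contains a = false then (pvMapMin g).insert a n
           else if PySem.Str.len ((pvMapMin g).getD a "") > PySem.Str.len n then
             (pvMapMin g).insert a n
           else pvMapMin g) := by
        rw [pvStepA, if_pos hcol]
      have hB : g.modify a [] (· ++ [n]) = g.insert a (g.getD a [] ++ [n]) := rfl
      rw [hA, hfm]
      simp only [List.foldl_cons]
      rw [hB]
      by_cases hc : g.contains a = true
      · obtain ⟨names, hnames⟩ : ∃ names, g.get? a = some names := by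
          rw [PySem.Dict.contains_eq_isSome_get?] at hc
          exact Option.isSome_iff_exists.mp hc
        have hnamesne : names ≠ [] :=
          hne (a, names) (PySem.Dict.mem_items_of_get?_eq_some g hnames)
        have hgd : g.getD a [] = names := by
          rw [PySem.Dict.getD_eq_get?_getD, hnames]; rfl
        have hdg : (pvMapMin g).getD a "" = pvMins names := by
          rw [PySem.Dict.getD_eq_get?_getD, pvMapMin_get?, hnames]; rfl
        have hcontains : (pvMapMin g).contains a = true := by
          rw [pvMapMin_contains]; exact hc
        have hinv1 : (g.insert a (names ++ [n])).keys.Nodup :=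
          PySem.Dict.nodup_keys_insert g a _ hnd
        have hinv2 : ∀ p ∈ (g.insert a (names ++ [n])).items, p.2 ≠ [] := by
          intro p hp
          rcases (PySem.Dict.mem_items_insert _ _ _ p).mp hp with h1 | h1
          · rw [h1]; simp
          · exact hne p h1.1
        rw [hgd, if_neg (by rw [hcontains]; simp), hdg]
        rw [← ih (g.insert a (names ++ [n])) hinv1 hinv2]
        congr 1
        rw [pvMapMin_insert, pvMins_append names n hnamesne]
        simp only [gt_iff_lt]
        by_cases hlt : PySem.Str.len n < PySem.Str.len (pvMins names)
        · rw [if_pos hlt, if_pos hlt]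
        · rw [if_neg hlt, if_neg hlt]
          exact (pv_insert_getD_self (pvMapMin g) a (pvMins names)
            (by rw [pvMapMin_keys]; exact hnd)
            (by rw [pvMapMin_get?, hnames]; rfl)).symm
      · have hcontains : (pvMapMin g).contains a = false := by
          rw [pvMapMin_contains]; exact Bool.eq_false_iff.mpr hc
        have hgd : g.getD a [] = [] :=
          PySem.Dict.getD_of_not_contains g [] (Bool.eq_false_iff.mpr hc)
        have hinv1 : (g.insert a [n]).keys.Nodup :=
          PySem.Dict.nodup_keys_insert g a _ hnd
        have hinv2 : ∀ p ∈ (g.insert a [n]).items, p.2 ≠ [] := by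
          intro p hp
          rcases (PySem.Dict.mem_items_insert _ _ _ p).mp hp with h1 | h1
          · rw [h1]; simp
          · exact hne p h1.1
        rw [hgd, if_pos hcontains]
        simp only [List.nil_append]
        rw [← ih (g.insert a [n]) hinv1 hinv2]
        congr 1
        rw [pvMapMin_insert]
        rfl
    · have h1 : pvStepA (pvMapMin g) l = pvMapMin g := by
        rw [pvStepA, if_neg hcol]
      have h2 : pvPairsB (l :: t) = pvPairsB t := by
        rw [pvPairsB, List.filterMap_cons, pvPairOfLine, if_neg hcol]; rfl
      rw [h1, h2]
      exact ih g hnd hne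

-- A's inline line list equals B's pvLinesB
theorem pv_lines_eq (log : String) :
    (PySem.Str.split?
      (PySem.Str.strip
        ((((PySem.Str.split? log "Logs:").getD []).getLast?.getD ""
          |> fun s => (PySem.Str.split? s "Suite result:").getD []).headD ""))
      "\n").getD [] = pvLinesB log := by
  rw [pvLinesB, pv_last_eq_rev_head]

-- ===== VERDICT (by name: the statement is the Claim_ definition above) =====
theorem parse_read_function_checker_result_spec : Claim_equal_parse_read_function_checker_result := by
  intro log _
  unfold Spec_parse_read_function_checker_result parse_read_function_checker_result
    parse_read_function_checker_result_alt
  by_cases h : PySem.Str.isIn "Logs" log = false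
  · rw [if_pos h, if_pos h]
  · rw [if_neg h, if_neg h]
    dsimp only []
    have h1 := pv_loop (pvLinesB log)
      PySem.Dict.empty (by simp [PySem.Dict.empty, PySem.Dict.keys])
      (by intro p hp; simp [PySem.Dict.empty] at hp)
    rw [show pvMapMin PySem.Dict.empty = PySem.Dict.empty from rfl] at h1
    rw [pv_lines_eq, h1, pvMapMin_items]
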